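-- pv_equiv track=rewrite | github.com/nemesszili/gaitrec | util/features.py | _minima
-- ===== SOURCE A (Python) =====
-- def _minima(vals):
--     minx = vals[0][0]
--     miny = vals[0][1]
--     minz = vals[0][2]
--
--     for val in vals:
--         if minx > val[0]:
--             minx = val[0]
--
--         if miny > val[1]:
--             miny = val[1]
--
--         if minz > val[2]:
--             minz = val[2]
--
--     return [minx, miny, minz]
-- ===== SOURCE B (Python) =====
-- def _minima(vals):
--     return [min(v[0] for v in vals),
--             min(v[1] for v in vals),
--             min(v[2] for v in vals)]
-- ===== Notes on version B (the rewrite author's own statement) =====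
-- stated objective: idiomatic
-- what changed: Replaces the single interleaved running-minimum loop over a 3-field mutable state with three independent per-column passes using the built-in min over a generator for each coordinate.
-- outside the precondition, e.g. on _minima([]): A raises IndexError, B raises ValueError
import Mathlib
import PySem

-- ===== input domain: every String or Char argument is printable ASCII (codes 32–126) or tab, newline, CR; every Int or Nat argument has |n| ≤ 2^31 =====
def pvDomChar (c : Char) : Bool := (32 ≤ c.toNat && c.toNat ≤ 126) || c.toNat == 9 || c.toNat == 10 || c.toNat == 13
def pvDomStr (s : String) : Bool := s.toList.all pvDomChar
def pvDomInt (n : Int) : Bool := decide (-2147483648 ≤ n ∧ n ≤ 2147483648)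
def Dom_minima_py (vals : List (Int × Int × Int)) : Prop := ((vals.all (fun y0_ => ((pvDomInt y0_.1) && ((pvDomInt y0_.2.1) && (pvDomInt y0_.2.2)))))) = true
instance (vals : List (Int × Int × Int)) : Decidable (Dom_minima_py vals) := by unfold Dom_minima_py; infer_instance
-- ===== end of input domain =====

-- B computes each column minimum in its own pass with built-in min, instead of A's single interleaved running-minimum loop (objective: idiomatic).


-- ===== PORT A =====
-- literal port: seed minx/miny/minz from vals[0], then one pass updating each with an if.
-- ([] is excluded by Pre_: Python raises IndexError at vals[0])
def minima_py (vals : List (Int × Int × Int)) : List Int :=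
  match vals with
  | [] => []
  | v0 :: _ =>
    let st := vals.foldl
      (fun (m : Int × Int × Int) val =>
        (if m.1 > val.1 then val.1 else m.1,
         if m.2.1 > val.2.1 then val.2.1 else m.2.1,
         if m.2.2 > val.2.2 then val.2.2 else m.2.2))
      (v0.1, v0.2.1, v0.2.2)
    [st.1, st.2.1, st.2.2]

-- ===== PORT B =====
-- Python's min over a nonempty sequence: fold min starting from the first element.
def pyMinList (h : Int) (t : List Int) : Int := t.foldl min h

def minima_py_alt (vals : List (Int × Int × Int)) : List Int :=
  match vals with
  | [] => []  -- excluded by Pre_: Python's min raises ValueError on an empty generator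
  | v0 :: rest =>
    [pyMinList v0.1 (rest.map (·.1)),
     pyMinList v0.2.1 (rest.map (·.2.1)),
     pyMinList v0.2.2 (rest.map (·.2.2))]

-- ===== PRECONDITION & SPEC =====
-- Pre_ excludes only the empty list, on which A raises IndexError (and B raises ValueError).
def Pre_minima_py (vals : List (Int × Int × Int)) : Prop := vals ≠ []
instance (vals : List (Int × Int × Int)) : Decidable (Pre_minima_py vals) := by unfold Pre_minima_py; infer_instance
def pvWitness_minima_py : (List (Int × Int × Int)) := [(3, -1, 2), (0, 5, 2)]

def Spec_minima_py (vals : List (Int × Int × Int)) (out : List Int) : Prop := out = minima_py_alt vals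
instance (vals : List (Int × Int × Int)) (out : List Int) : Decidable (Spec_minima_py vals out) := by unfold Spec_minima_py; infer_instance

-- ===== CLAIM (what is proved, stated in full; the proofs are below) =====
def Claim_equal_minima_py : Prop := ∀ (vals : List (Int × Int × Int)), Dom_minima_py vals → Pre_minima_py vals → Spec_minima_py vals (minima_py vals)

-- ===== LEMMAS AND PROOFS =====

-- Python's "if m > v: m = v" update is exactly min.
theorem if_gt_eq_min (a v : Int) : (if a > v then v else a) = min a v := by
  rw [min_def]; split_ifs <;> omega

-- A's triple-state fold splits into three independent min-folds over the mapped columns.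
theorem foldl_triple_split (t : List (Int × Int × Int)) :
    ∀ (a b c : Int),
    t.foldl
      (fun (m : Int × Int × Int) val =>
        (min m.1 val.1, min m.2.1 val.2.1, min m.2.2 val.2.2))
      (a, b, c)
    = ((t.map (·.1)).foldl min a,
       (t.map (·.2.1)).foldl min b,
       (t.map (·.2.2)).foldl min c) := by
  induction t with
  | nil => intro a b c; rfl
  | cons v t ih =>
    intro a b c
    simp only [List.foldl_cons, List.map_cons, ih]

-- ===== VERDICT (by name: the statement is the Claim_ definition above) =====
theorem minima_py_spec : Claim_equal_minima_py := by
  intro vals _ hpre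
  unfold Spec_minima_py minima_py minima_py_alt pyMinList
  match vals with
  | [] => exact absurd rfl hpre
  | v0 :: rest =>
    simp only [if_gt_eq_min, List.foldl_cons, foldl_triple_split, min_self]
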